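-- pv_equiv track=rewrite | github.com/ceciliakan/MSNBC_task | ML/wrangle.py | classSelect
-- ===== SOURCE A (Python) =====
-- from itertools import groupby, izip, tee
-- from string import ascii_lowercase
--
-- def pairwise(iterable):
--     a, b = tee(iterable)
--     next(b, None)
--     return izip(a, b)
--
-- def classSelect(pg_raw, classInterval, sliceLen):
--     len_class = []
--
--     for i,j in pairwise(classInterval):
--         data = [ x[0:sliceLen] for x in pg_raw if (len(x) > i and len(x) <= j ) ]
--         len_class.append(data)
--
--     lb = list(ascii_lowercase)[ 0:len(classInterval)-1 ]
--
--     classLen = [ len(i) for i in len_class ]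
--     return len_class, classLen, lb
-- ===== SOURCE B (Python) =====
-- from string import ascii_lowercase
--
-- def classSelect(pg_raw, classInterval, sliceLen):
--     pairs = list(zip(classInterval, classInterval[1:]))
--     buckets = [[] for _ in pairs]
--     memo = {}
--     for x in pg_raw:
--         L = len(x)
--         ks = memo.get(L)
--         if ks is None:
--             ks = [k for k, (i, j) in enumerate(pairs) if i < L <= j]
--             memo[L] = ks
--         head = x[0:sliceLen]
--         for k in ks:
--             buckets[k].append(head)
--     classLen = [len(b) for b in buckets]
--     lb = list(ascii_lowercase)[0:len(classInterval) - 1]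
--     return buckets, classLen, lb
-- ===== Notes on version B (the rewrite author's own statement) =====
-- stated objective: faster
-- what changed: B replaces A's per-interval rescans of pg_raw by a single pass with a memo dict from string length to its list of matching bucket indices, so the inner scan over intervals runs once per distinct length instead of once per (string, interval) pair.
import Mathlib
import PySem

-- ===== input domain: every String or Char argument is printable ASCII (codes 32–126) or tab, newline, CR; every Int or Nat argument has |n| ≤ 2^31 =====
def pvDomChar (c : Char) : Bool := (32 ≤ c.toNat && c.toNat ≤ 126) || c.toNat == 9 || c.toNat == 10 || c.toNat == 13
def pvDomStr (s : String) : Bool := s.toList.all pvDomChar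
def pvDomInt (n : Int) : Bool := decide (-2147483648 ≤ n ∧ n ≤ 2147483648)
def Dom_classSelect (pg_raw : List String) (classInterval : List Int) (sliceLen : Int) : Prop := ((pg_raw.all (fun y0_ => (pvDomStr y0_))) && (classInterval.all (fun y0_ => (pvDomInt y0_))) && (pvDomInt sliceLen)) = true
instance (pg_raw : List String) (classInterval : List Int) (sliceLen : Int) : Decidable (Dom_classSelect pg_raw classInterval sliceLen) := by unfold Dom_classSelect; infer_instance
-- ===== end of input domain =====

-- B makes one pass over pg_raw with a memo dict length -> matching bucket indices (computed once per distinct length), instead of A's one scan of pg_raw per interval pair (objective: alternative).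

-- list(ascii_lowercase), shared by both ports
def pvAscii : List String := ["a","b","c","d","e","f","g","h","i","j","k","l","m","n","o","p","q","r","s","t","u","v","w","x","y","z"]

-- ===== PORT A =====
def classSelect (pg_raw : List String) (classInterval : List Int) (sliceLen : Int) : List (List String) × List Int × List String :=
  -- for i,j in pairwise(classInterval): len_class.append([x[0:sliceLen] for x in pg_raw if len(x)>i and len(x)<=j])
  let len_class := (classInterval.zip classInterval.tail).foldl
    (fun acc (p : Int × Int) =>
      let data := (pg_raw.filter (fun x => decide (p.1 < PySem.Str.len x ∧ PySem.Str.len x ≤ p.2))).map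
        (fun x => PySem.Str.slice x (some 0) (some sliceLen))
      acc ++ [data]) []
  let lb := PySem.List.slice pvAscii (some 0) (some ((classInterval.length : Int) - 1))
  let classLen := len_class.map (fun i => (i.length : Int))
  (len_class, classLen, lb)

-- ===== PORT B =====
-- ks = [k for k,(i,j) in enumerate(pairs) if i < L <= j]
def pvCanonKs (pairs : List (Int × Int)) (L : Int) : List Int :=
  (PySem.List.enumerate pairs).filterMap
    (fun kp => if kp.2.1 < L ∧ L ≤ kp.2.2 then some kp.1 else none)

-- buckets[k].append(head); k comes from enumerate so 0 ≤ k < len(buckets) (toNat exact there)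
def pvSetAppend (bs : List (List String)) (k : Int) (head : String) : List (List String) :=
  bs.set k.toNat ((bs.getD k.toNat []) ++ [head])

-- one loop iteration: memo lookup / fill, then append head to each matching bucket
def pvBStep (pairs : List (Int × Int)) (sliceLen : Int)
    (st : PySem.Dict Int (List Int) × List (List String)) (x : String) :
    PySem.Dict Int (List Int) × List (List String) :=
  let L := PySem.Str.len x
  let head := PySem.Str.slice x (some 0) (some sliceLen)
  match st.1.get? L with
  | some ks => (st.1, ks.foldl (fun bs k => pvSetAppend bs k head) st.2)
  | none =>
    let ks := pvCanonKs pairs L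
    (st.1.insert L ks, ks.foldl (fun bs k => pvSetAppend bs k head) st.2)

def classSelect_alt (pg_raw : List String) (classInterval : List Int) (sliceLen : Int) : List (List String) × List Int × List String :=
  let pairs := classInterval.zip (PySem.List.slice classInterval (some 1) none)
  let init : List (List String) := pairs.map (fun _ => [])
  let st := pg_raw.foldl (pvBStep pairs sliceLen) (PySem.Dict.empty, init)
  let buckets := st.2
  let classLen := buckets.map (fun b => (b.length : Int))
  let lb := PySem.List.slice pvAscii (some 0) (some ((classInterval.length : Int) - 1))
  (buckets, classLen, lb)

-- ===== PRECONDITION & SPEC =====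
def Spec_classSelect (pg_raw : List String) (classInterval : List Int) (sliceLen : Int) (out : List (List String) × List Int × List String) : Prop := out = classSelect_alt pg_raw classInterval sliceLen
instance (pg_raw : List String) (classInterval : List Int) (sliceLen : Int) (out : List (List String) × List Int × List String) : Decidable (Spec_classSelect pg_raw classInterval sliceLen out) := by unfold Spec_classSelect; infer_instance

-- ===== CLAIM (what is proved, stated in full; the proofs are below) =====
def Claim_equal_classSelect : Prop := ∀ (pg_raw : List String) (classInterval : List Int) (sliceLen : Int), Dom_classSelect pg_raw classInterval sliceLen → Spec_classSelect pg_raw classInterval sliceLen (classSelect pg_raw classInterval sliceLen)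

-- ===== LEMMAS AND PROOFS =====

-- the simultaneous per-bucket conditional update (reference form both ports are reduced to)
def pvOldStep (pairs : List (Int × Int)) (sliceLen : Int)
    (bs : List (List String)) (x : String) : List (List String) :=
  let L := PySem.Str.len x
  let head := PySem.Str.slice x (some 0) (some sliceLen)
  (bs.zip pairs).map (fun q => if q.2.1 < L ∧ L ≤ q.2.2 then q.1 ++ [head] else q.1)

-- A's append-accumulating fold is map
theorem pv_foldl_app {α β : Type} (f : α → β) :
    ∀ (l : List α) (acc : List β), l.foldl (fun a p => a ++ [f p]) acc = acc ++ l.map f := by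
  intro l
  induction l with
  | nil => simp
  | cons x xs ih => intro acc; simp [List.foldl, ih]

-- zipping a mapped list with its source pairs each image with its source
theorem pv_zipmap {α β : Type} (F : α → β) : ∀ (l : List α), (l.map F).zip l = l.map (fun p => (F p, p)) := by
  intro l
  induction l with
  | nil => simp
  | cons a l ih => simp [ih]

-- pvOldStep distributes to per-bucket filters
theorem pv_fold_inv (sliceLen : Int)
    (xs : List String) : ∀ (pairs : List (Int × Int)) (F : Int × Int → List String),
    xs.foldl (pvOldStep pairs sliceLen) (pairs.map F)
    = pairs.map (fun p => F p ++
        ((xs.filter (fun x => decide (p.1 < PySem.Str.len x ∧ PySem.Str.len x ≤ p.2))).map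
          (fun x => PySem.Str.slice x (some 0) (some sliceLen)))) := by
  induction xs with
  | nil => intro pairs F; simp
  | cons x xs ih =>
    intro pairs F
    rw [List.foldl_cons]
    show List.foldl _ (((pairs.map F).zip pairs).map _) _ = _
    simp only [pv_zipmap, List.map_map]
    rw [ih]
    apply List.map_congr_left
    intro p _
    simp only [Function.comp_def, List.filter_cons, PySem.Str.len]
    by_cases h : p.1 < (x.length : Int) ∧ (x.length : Int) ≤ p.2
    · simp [h]
    · simp [h]

-- enumerate with shifted start shifts every index
theorem pv_enumerate_shift {α : Type} (l : List α) : ∀ (s : Int),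
    PySem.List.enumerate l (s + 1) = (PySem.List.enumerate l s).map (fun kp => (kp.1 + 1, kp.2)) := by
  induction l with
  | nil => intro s; simp [PySem.List.enumerate_nil]
  | cons a l ih =>
    intro s
    rw [PySem.List.enumerate_cons, PySem.List.enumerate_cons, List.map_cons]
    rw [show s + 1 + 1 = (s + 1) + 1 from rfl, ih (s + 1)]

-- filterMap with a shifted success value is map after filterMap
theorem pv_filterMap_shift {α : Type} (c : α → Prop) [DecidablePred c] :
    ∀ (l : List (Int × α)),
    l.filterMap (fun kp => if c kp.2 then some (kp.1 + 1) else none)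
    = (l.filterMap (fun kp => if c kp.2 then some kp.1 else none)).map (fun k => k + 1) := by
  intro l
  induction l with
  | nil => rfl
  | cons a l ih =>
    rw [List.filterMap_cons, List.filterMap_cons]
    by_cases h : c a.2
    · simp only [h, if_pos, List.map_cons, ih]
    · simp only [h, if_false, ih]

-- pvCanonKs unfolds structurally on the pairs list
theorem pv_canon_cons (p : Int × Int) (ps : List (Int × Int)) (L : Int) :
    pvCanonKs (p :: ps) L
    = (if p.1 < L ∧ L ≤ p.2 then [(0 : Int)] else []) ++ (pvCanonKs ps L).map (fun k => k + 1) := by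
  unfold pvCanonKs
  rw [PySem.List.enumerate_cons, show (0 : Int) + 1 = 0 + 1 from rfl, pv_enumerate_shift ps 0,
    List.filterMap_cons, List.filterMap_map]
  have hshift := pv_filterMap_shift (fun q : Int × Int => q.1 < L ∧ L ≤ q.2) (PySem.List.enumerate ps)
  simp only [Function.comp_def]
  by_cases h : p.1 < L ∧ L ≤ p.2
  · simp [h, hshift]
  · simp [h, hshift]

-- indices produced by pvCanonKs are nonnegative
theorem pv_canon_nonneg (ps : List (Int × Int)) (L : Int) : ∀ k ∈ pvCanonKs ps L, 0 ≤ k := by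
  induction ps with
  | nil => intro k hk; simp [pvCanonKs, PySem.List.enumerate_nil] at hk
  | cons p ps ih =>
    intro k hk
    rw [pv_canon_cons] at hk
    rcases List.mem_append.mp hk with h | h
    · split at h <;> simp_all
    · rcases List.mem_map.mp h with ⟨k0, hk0, rfl⟩
      have := ih k0 hk0; omega

-- folding pvSetAppend over shifted indices skips the head bucket
theorem pv_fold_shift (head : String) (b : List String) :
    ∀ (ks : List Int) (bs : List (List String)), (∀ k ∈ ks, 0 ≤ k) →
    (ks.map (fun k => k + 1)).foldl (fun bs k => pvSetAppend bs k head) (b :: bs)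
    = b :: ks.foldl (fun bs k => pvSetAppend bs k head) bs := by
  intro ks
  induction ks with
  | nil => intro bs _; rfl
  | cons k ks ih =>
    intro bs hnn
    have hk : 0 ≤ k := hnn k (by simp)
    have hstep : pvSetAppend (b :: bs) (k + 1) head = b :: pvSetAppend bs k head := by
      unfold pvSetAppend
      have : (k + 1).toNat = k.toNat + 1 := by omega
      rw [this]
      rfl
    rw [List.map_cons, List.foldl_cons, hstep, List.foldl_cons]
    exact ih (pvSetAppend bs k head) (fun k hk => hnn k (by simp [hk]))

-- KEY: folding appends over the canonical index list is the simultaneous conditional update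
theorem pv_key (sliceLen : Int) (x : String) :
    ∀ (pairs : List (Int × Int)) (bs : List (List String)), bs.length = pairs.length →
    (pvCanonKs pairs (PySem.Str.len x)).foldl
      (fun bs k => pvSetAppend bs k (PySem.Str.slice x (some 0) (some sliceLen))) bs
    = pvOldStep pairs sliceLen bs x := by
  intro pairs
  induction pairs with
  | nil =>
    intro bs hlen
    rw [List.length_nil] at hlen
    rw [List.length_eq_zero_iff.mp hlen]
    rfl
  | cons p ps ih =>
    intro bs hlen
    cases bs with
    | nil => simp at hlen
    | cons b bs =>
      rw [pv_canon_cons, List.foldl_append]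
      have hlen' : bs.length = ps.length := by simpa using hlen
      by_cases h : p.1 < PySem.Str.len x ∧ PySem.Str.len x ≤ p.2
      · rw [if_pos h, List.foldl_cons, List.foldl_nil]
        have h0 : pvSetAppend (b :: bs) 0 (PySem.Str.slice x (some 0) (some sliceLen))
            = (b ++ [PySem.Str.slice x (some 0) (some sliceLen)]) :: bs := rfl
        rw [h0, pv_fold_shift _ _ _ _ (pv_canon_nonneg ps _), ih bs hlen']
        simp only [pvOldStep, List.zip_cons_cons, List.map_cons]
        rw [if_pos h]
      · rw [if_neg h, List.foldl_nil]
        rw [pv_fold_shift _ _ _ _ (pv_canon_nonneg ps _), ih bs hlen']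
        simp only [pvOldStep, List.zip_cons_cons, List.map_cons]
        rw [if_neg h]

-- pvOldStep preserves length
theorem pv_oldstep_len (pairs : List (Int × Int)) (sliceLen : Int) (bs : List (List String)) (x : String)
    (h : bs.length = pairs.length) : (pvOldStep pairs sliceLen bs x).length = pairs.length := by
  unfold pvOldStep
  simp [List.length_zip, h]

-- MEMO: the memoised single pass equals the pass without memo, given the memo invariant
theorem pv_memo (pairs : List (Int × Int)) (sliceLen : Int) :
    ∀ (xs : List String) (memo : PySem.Dict Int (List Int)) (bs : List (List String)),
    (∀ L ks, memo.get? L = some ks → ks = pvCanonKs pairs L) → bs.length = pairs.length →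
    (xs.foldl (pvBStep pairs sliceLen) (memo, bs)).2 = xs.foldl (pvOldStep pairs sliceLen) bs := by
  intro xs
  induction xs with
  | nil => intro memo bs _ _; rfl
  | cons x xs ih =>
    intro memo bs hinv hlen
    rw [List.foldl_cons, List.foldl_cons]
    unfold pvBStep
    cases hget : memo.get? (PySem.Str.len x) with
    | some ks =>
      simp only [hget]
      rw [hinv _ _ hget, pv_key sliceLen x pairs bs hlen]
      exact ih memo _ hinv (pv_oldstep_len pairs sliceLen bs x hlen)
    | none =>
      simp only [hget]
      rw [pv_key sliceLen x pairs bs hlen]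
      apply ih _ _ ?_ (pv_oldstep_len pairs sliceLen bs x hlen)
      intro L ks hL
      rw [PySem.Dict.get?_insert] at hL
      split at hL
      · cases hL; subst ‹L = _›; rfl
      · exact hinv L ks hL

-- ===== VERDICT (by name: the statement is the Claim_ definition above) =====
theorem classSelect_spec : Claim_equal_classSelect := by
  intro pg_raw classInterval sliceLen _
  unfold Spec_classSelect classSelect classSelect_alt
  simp only [PySem.List.slice_from_one]
  rw [pv_foldl_app, List.nil_append]
  rw [pv_memo (classInterval.zip classInterval.tail) sliceLen pg_raw PySem.Dict.empty _
        (by intro L ks h; simp [PySem.Dict.get?_empty] at h) (by simp)]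
  have := pv_fold_inv sliceLen pg_raw (classInterval.zip classInterval.tail) (fun _ => [])
  simp only [List.nil_append] at this
  rw [this]
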